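-- pv_equiv track=rewrite | github.com/AyushAgnihotri2025/CP-Solutions | GeeksforGeeks/Python3/Medium/Bitwise AND of the Array/bitwise-and-of-the-array.py | count
-- ===== SOURCE A (Python) =====
-- def count(N, A, X):
--     # code here
--     prefix = 0
--     ans = N
--     for i in range(30, -1, -1):
--         if X & (1 << i):
--             prefix |= 1 << i
--             continue
--         cnt = 0
--         prefix |= 1 << i
--         for a in A:
--             if (a & prefix) == prefix:
--                 cnt += 1
--         ans = min(ans, N - cnt)
--         prefix ^= 1 << i
--     return ans
-- ===== SOURCE B (Python) =====
-- def count(N, A, X):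
--     # One pass over the elements (instead of a scan of A per bit):
--     # counts[i] = how many a in A keep all of X's set bits above i and have bit i set.
--     counts = [0] * 31
--     for a in A:
--         ok = True
--         for i in range(30, -1, -1):
--             if X & (1 << i):
--                 if not (a & (1 << i)):
--                     ok = False
--             elif ok and (a & (1 << i)):
--                 counts[i] += 1
--     return N - max(counts)
-- ===== Notes on version B (the rewrite author's own statement) =====
-- stated objective: alternative
-- what changed: Transposes the loop nest: instead of rescanning the whole array once per zero bit of X with a running prefix mask, B makes a single pass over the elements, maintaining a per-element 'high bits of X still matched' flag and a 31-entry counts table, and returns N - max(counts).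
import Mathlib
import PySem

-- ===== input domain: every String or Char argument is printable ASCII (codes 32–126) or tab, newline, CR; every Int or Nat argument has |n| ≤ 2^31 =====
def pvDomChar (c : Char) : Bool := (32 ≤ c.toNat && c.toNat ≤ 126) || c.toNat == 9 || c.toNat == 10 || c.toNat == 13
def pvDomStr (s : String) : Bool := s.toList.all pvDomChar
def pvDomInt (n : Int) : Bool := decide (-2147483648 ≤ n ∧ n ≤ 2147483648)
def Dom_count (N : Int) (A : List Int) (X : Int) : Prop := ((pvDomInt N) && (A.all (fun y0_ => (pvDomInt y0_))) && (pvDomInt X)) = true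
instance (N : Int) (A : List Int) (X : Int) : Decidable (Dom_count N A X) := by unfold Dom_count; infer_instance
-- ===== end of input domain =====

-- B transposes A's loop nest (one pass over the elements with a per-bit counts table
-- instead of one pass over the array per zero bit of X); equal return value, no speed claim.

-- ===== PORT A =====
-- loop body of A's outer `for i in range(30, -1, -1)` (state: (prefix, ans))
def stepA (N : Int) (A : List Int) (X : Int) (st : Int × Int) (i : Int) : Int × Int :=
  if PySem.Int.band X ((1:Int) <<< i.toNat) ≠ 0 then
    (PySem.Int.bor st.1 ((1:Int) <<< i.toNat), st.2)
  else
    let p2 := PySem.Int.bor st.1 ((1:Int) <<< i.toNat)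
    let cnt := A.foldl (fun (c : Int) (a : Int) =>
      if PySem.Int.band a p2 = p2 then c + 1 else c) 0
    (PySem.Int.bxor p2 ((1:Int) <<< i.toNat), min st.2 (N - cnt))

def count (N : Int) (A : List Int) (X : Int) : Int :=
  (((PySem.List.pyRange 30 (-1) (-1)).foldl (stepA N A X) ((0:Int), N))).2

-- ===== PORT B =====
-- loop body of B's inner `for i in range(30, -1, -1)` for one element a (state: (ok, counts))
def innerB (X : Int) (a : Int) (st : Bool × List Int) (i : Int) : Bool × List Int :=
  if PySem.Int.band X ((1:Int) <<< i.toNat) ≠ 0 then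
    (if PySem.Int.band a ((1:Int) <<< i.toNat) = 0 then false else st.1, st.2)
  else if st.1 = true ∧ PySem.Int.band a ((1:Int) <<< i.toNat) ≠ 0 then
    (st.1, PySem.List.pySetD st.2 i (PySem.List.pyGetD st.2 i 0 + 1))
  else st

-- body of B's `for a in A` loop
def outerB (X : Int) (counts : List Int) (a : Int) : List Int :=
  ((PySem.List.pyRange 30 (-1) (-1)).foldl (innerB X a) (true, counts)).2

def count_alt (N : Int) (A : List Int) (X : Int) : Int :=
  let counts := A.foldl (outerB X) (List.replicate 31 (0:Int))
  -- counts has 31 entries, so Python's max(counts) never sees an empty list; .getD 0 is unreachable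
  N - ((PySem.List.max? counts (fun y => y)).getD 0)

-- ===== PRECONDITION & SPEC =====
def Spec_count (N : Int) (A : List Int) (X : Int) (out : Int) : Prop := out = count_alt N A X
instance (N : Int) (A : List Int) (X : Int) (out : Int) : Decidable (Spec_count N A X out) := by unfold Spec_count; infer_instance

-- ===== CLAIM (what is proved, stated in full; the proofs are below) =====
def Claim_equal_count : Prop := ∀ (N : Int) (A : List Int) (X : Int), Dom_count N A X → Spec_count N A X (count N A X)

-- ===== LEMMAS AND PROOFS =====

-- Python's low 31 bits of an int (both programs only ever look at bits 0..30)
def red (a : Int) : Nat := (a % 2147483648).toNat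

-- ok-flag of B after the bits 30..i have been consumed down to i (exclusive): all of X's
-- set bits in [i,31) are set in a
def okAbove (X a : Int) (i : Nat) : Bool :=
  (List.range' i (31 - i)).all (fun j => !(red X).testBit j || (red a).testBit j)

-- the per-bit predicate both programs count
def goodB (X a : Int) (i : Nat) : Bool :=
  (!(red X).testBit i) && (okAbove X a (i+1) && (red a).testBit i)

def cnt (X : Int) (A : List Int) (i : Nat) : Int := (A.countP (fun a => goodB X a i) : Int)

-- A's prefix mask entering iteration i-1 (X's set bits in [i,31))
def hm (X : Int) (i : Nat) : Nat :=
  (List.range' i (31 - i)).foldr (fun j acc => if (red X).testBit j then acc ||| 2^j else acc) 0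

-- best count over bits [i,31) (0 if none)
def ba (X : Int) (A : List Int) (i : Nat) : Int :=
  ((List.range' i (31 - i)).map (cnt X A)).foldr max 0

-- B's counts table after the bits 30..i have been consumed down to i (exclusive)
def updFrom (X a : Int) (i : Nat) (cs : List Int) : List Int :=
  cs.mapIdx (fun j c => if i ≤ j ∧ goodB X a j = true then c + 1 else c)

-- ---- generic Nat bit lemmas ----

theorem sum_or_and (x y : Nat) : x + y = (x ||| y) + (x &&& y) := by
  induction x using Nat.strong_induction_on generalizing y with
  | _ x ih =>
    rcases Nat.eq_zero_or_pos x with h | h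
    · simp [h]
    · have IH := ih (x/2) (Nat.div_lt_self h (by norm_num)) (y/2)
      have h1 : (x ||| y) / 2 = x/2 ||| y/2 := Nat.or_div_two
      have h2 : (x &&& y) / 2 = x/2 &&& y/2 := Nat.and_div_two
      have hor : ((x ||| y) % 2 = 1) ↔ (x % 2 = 1 ∨ y % 2 = 1) := by
        have h' := Nat.testBit_or x y 0
        simp only [Nat.testBit_zero] at h'
        simpa using congrArg (· = true) h'
      have hand : ((x &&& y) % 2 = 1) ↔ (x % 2 = 1 ∧ y % 2 = 1) := by
        have h' := Nat.testBit_and x y 0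
        simp only [Nat.testBit_zero] at h'
        simpa using congrArg (· = true) h'
      have d1 := Nat.div_add_mod x 2
      have d2 := Nat.div_add_mod y 2
      have d3 := Nat.div_add_mod (x|||y) 2
      have d4 := Nat.div_add_mod (x&&&y) 2
      rw [h1] at d3; rw [h2] at d4
      have m1 := Nat.mod_two_eq_zero_or_one x
      have m2 := Nat.mod_two_eq_zero_or_one y
      have m3 := Nat.mod_two_eq_zero_or_one (x|||y)
      have m4 := Nat.mod_two_eq_zero_or_one (x&&&y)
      omega

theorem sub_and (m n : Nat) : m - (m &&& n) = m.ldiff n := by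
  have hdisj : (m.ldiff n) &&& (m &&& n) = 0 := by
    apply Nat.eq_of_testBit_eq
    intro j
    simp only [Nat.testBit_and, Nat.testBit_ldiff, Nat.zero_testBit]
    cases m.testBit j <;> cases n.testBit j <;> simp
  have hor : (m.ldiff n) ||| (m &&& n) = m := by
    apply Nat.eq_of_testBit_eq
    intro j
    simp only [Nat.testBit_or, Nat.testBit_and, Nat.testBit_ldiff]
    cases m.testBit j <;> cases n.testBit j <;> simp
  have hsum := sum_or_and (m.ldiff n) (m &&& n)
  rw [hdisj, hor] at hsum
  omega

theorem bit_lt {m : Nat} {j : Nat} (hm : m < 2^31) (h : m.testBit j = true) : j < 31 := by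
  by_contra hj
  have h31 : (2:Nat)^31 ≤ 2^j := Nat.pow_le_pow_right (by norm_num) (by omega)
  rw [Nat.testBit_lt_two_pow (lt_of_lt_of_le hm h31)] at h
  exact Bool.false_ne_true h

theorem submask_iff (x m : Nat) :
    x &&& m = m ↔ ∀ j, m.testBit j = true → x.testBit j = true := by
  constructor
  · intro h j hj
    have := congrArg (fun z => z.testBit j) h
    simp only [Nat.testBit_and, hj, Bool.and_true] at this
    exact this
  · intro h
    apply Nat.eq_of_testBit_eq
    intro j
    simp only [Nat.testBit_and]
    by_cases hj : m.testBit j = true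
    · simp [hj, h j hj]
    · simp [Bool.eq_false_iff.mpr hj]

theorem mod_and (x m : Nat) (hm : m < 2^31) : (x % 2^31) &&& m = x &&& m := by
  apply Nat.eq_of_testBit_eq
  intro j
  simp only [Nat.testBit_and, Nat.testBit_mod_two_pow]
  by_cases hj : m.testBit j = true
  · have := bit_lt hm hj
    simp [hj, this]
  · simp [Bool.eq_false_iff.mpr hj]

theorem compl_testBit (q : Nat) (hq : q < 2^31) (j : Nat) :
    ((2^31 - 1) - q).testBit j = (decide (j < 31) && !q.testBit j) := by
  have hsub : (2^31 - 1) &&& q = q := by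
    apply Nat.eq_of_testBit_eq
    intro k
    simp only [Nat.testBit_and, Nat.testBit_two_pow_sub_one]
    by_cases hk : q.testBit k = true
    · simp [hk, bit_lt hq hk]
    · simp [Bool.eq_false_iff.mpr hk]
  calc ((2^31 - 1) - q).testBit j
      = ((2^31 - 1) - ((2^31 - 1) &&& q)).testBit j := by rw [hsub]
    _ = ((2^31 - 1).ldiff q).testBit j := by rw [sub_and]
    _ = (decide (j < 31) && !q.testBit j) := by
        rw [Nat.testBit_ldiff, Nat.testBit_two_pow_sub_one]

-- ---- red / band bridges ----

theorem red_nonneg_eq (n : Nat) : red (n : Int) = n % 2^31 := by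
  unfold red
  have : (n : Int) % 2147483648 = ((n % 2147483648 : Nat) : Int) := by
    norm_cast
  rw [this, Int.toNat_natCast]
  norm_num

theorem red_neg_eq (a : Int) (ha : a < 0) : red a = (2^31 - 1) - ((-a-1).toNat % 2^31) := by
  unfold red
  set n := (-a-1).toNat with hn
  set q := n % 2^31 with hq
  set d := n / 2^31 with hd
  have hqlt : q < 2^31 := Nat.mod_lt _ (by norm_num)
  have hna : ((n : Nat) : Int) = -a - 1 := Int.toNat_of_nonneg (by omega)
  have hdm : 2^31 * d + q = n := Nat.div_add_mod n (2^31)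
  have ha' : a = ((2:Int)^31 - 1 - (q : Int)) + 2147483648 * (-((d:Int)+1)) := by
    have : ((2:Nat)^31 * d + q : Nat) = n := hdm
    have hcast : (2:Int)^31 * (d:Int) + (q:Int) = (n:Int) := by exact_mod_cast this
    have : (2147483648 : Int) = 2^31 := by norm_num
    rw [this]
    omega
  have hmod : a % 2147483648 = (2:Int)^31 - 1 - (q:Int) := by
    rw [ha']
    rw [Int.add_mul_emod_self_left]
    apply Int.emod_eq_of_lt
    · have : (0:Int) ≤ (q:Int) := by positivity
      norm_num; omega
    · norm_num; omega
  rw [hmod]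
  omega

theorem band_mask (a : Int) (m : Nat) (hm : m < 2^31) :
    PySem.Int.band a (m : Int) = ((red a &&& m : Nat) : Int) := by
  rw [PySem.Int.band.eq_1]
  by_cases ha : 0 ≤ a
  · rw [if_pos ha, if_pos (by positivity : (0:Int) ≤ (m:Int)), Int.toNat_natCast]
    have h1 : a = ((a.toNat : Nat) : Int) := (Int.toNat_of_nonneg ha).symm
    have h2 : red a = a.toNat % 2^31 := by rw [h1]; exact red_nonneg_eq a.toNat
    rw [h2, mod_and _ _ hm]
  · rw [if_neg ha, if_pos (by positivity : (0:Int) ≤ (m:Int)), Int.toNat_natCast]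
    have ha' : a < 0 := by omega
    set n := (-a-1).toNat with hn
    set q := n % 2^31 with hq
    have hqlt : q < 2^31 := Nat.mod_lt _ (by norm_num)
    have hred : red a = (2^31 - 1) - q := red_neg_eq a ha'
    congr 1
    rw [sub_and, hred]
    apply Nat.eq_of_testBit_eq
    intro j
    rw [Nat.testBit_ldiff, Nat.testBit_and, compl_testBit q hqlt j]
    have hqbit : q.testBit j = (decide (j < 31) && n.testBit j) := by
      rw [hq, Nat.testBit_mod_two_pow]
    by_cases hmj : m.testBit j = true
    · have hj31 : j < 31 := bit_lt hm hmj
      simp [hmj, hqbit, hj31]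
    · simp [Bool.eq_false_iff.mpr hmj]

theorem band_test (a : Int) (i : Nat) (hi : i ≤ 30) :
    (PySem.Int.band a ((2^i : Nat) : Int) ≠ 0) ↔ (red a).testBit i = true := by
  have hlt : (2:Nat)^i < 2^31 := Nat.pow_lt_pow_right (by norm_num) (by omega)
  rw [band_mask a (2^i) hlt]
  rw [Nat.and_two_pow]
  cases h : (red a).testBit i
  · simp
  · simp

-- ---- mask characterizations ----

theorem hm_recur (X : Int) (i : Nat) (hi : i < 31) :
    hm X i = if (red X).testBit i then hm X (i+1) ||| 2^i else hm X (i+1) := by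
  unfold hm
  have h : 31 - i = (31 - (i+1)) + 1 := by omega
  rw [h, List.range'_succ]
  simp

theorem hm_top (X : Int) : hm X 31 = 0 := by
  unfold hm
  norm_num

theorem hm_ge (X : Int) (i : Nat) (hi : 31 ≤ i) : hm X i = 0 := by
  unfold hm
  have : 31 - i = 0 := by omega
  rw [this, List.range'_zero]
  rfl

theorem hm_testBit (X : Int) (i : Nat) (j : Nat) :
    (hm X i).testBit j = (decide (i ≤ j) && (decide (j < 31) && (red X).testBit j)) := by
  induction hd : (31 - i) generalizing i with
  | zero =>
    rw [hm_ge X i (by omega)]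
    have h1 : ¬ (i ≤ j ∧ j < 31) := by omega
    rcases Nat.lt_or_ge j 31 with h|h
    · simp [Nat.zero_testBit, show ¬ i ≤ j by omega]
    · simp [Nat.zero_testBit, show ¬ j < 31 by omega]
  | succ d IH =>
    have hi : i < 31 := by omega
    rw [hm_recur X i hi]
    have IH' := IH (i+1) (by omega)
    by_cases hx : (red X).testBit i = true
    · rw [if_pos hx]
      rw [Nat.testBit_or, IH', Nat.testBit_two_pow]
      by_cases hj : j = i
      · subst hj
        simp [hx, show ¬ (j+1 ≤ j) by omega, show j < 31 from hi]
      · by_cases hij : i ≤ j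
        · have : i + 1 ≤ j := by omega
          simp [this, show i ≤ j from hij, Ne.symm hj]
        · simp [show ¬ (i+1 ≤ j) by omega, hij, Ne.symm hj]
    · rw [if_neg hx]
      rw [IH']
      by_cases hj : j = i
      · subst hj
        simp [Bool.eq_false_iff.mpr hx, show ¬ (j+1 ≤ j) by omega]
      · by_cases hij : i ≤ j
        · have : i + 1 ≤ j := by omega
          simp [this, show i ≤ j from hij]
        · simp [show ¬ (i+1 ≤ j) by omega, hij]

theorem mask_fold_lt (X : Int) (l : List Nat) (h : ∀ j ∈ l, j < 31) :
    (l.foldr (fun j acc => if (red X).testBit j then acc ||| 2^j else acc) 0) < 2^31 := by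
  induction l with
  | nil => norm_num
  | cons x t IH =>
    have hx : x < 31 := h x (by simp)
    have ht := IH (fun j hj => h j (by simp [hj]))
    simp only [List.foldr_cons]
    split
    · exact Nat.or_lt_two_pow ht (Nat.pow_lt_pow_right (by norm_num) hx)
    · exact ht

theorem hm_lt (X : Int) (i : Nat) : hm X i < 2^31 := by
  unfold hm
  apply mask_fold_lt
  intro j hj
  rw [List.mem_range'_1] at hj
  omega

theorem okAbove_recur (X a : Int) (i : Nat) (hi : i < 31) :
    okAbove X a i = ((!(red X).testBit i || (red a).testBit i) && okAbove X a (i+1)) := by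
  unfold okAbove
  have h : 31 - i = (31 - (i+1)) + 1 := by omega
  rw [h, List.range'_succ, List.all_cons]

theorem okAbove_top (X a : Int) : okAbove X a 31 = true := by
  unfold okAbove
  norm_num

theorem okAbove_iff (X a : Int) (i : Nat) :
    okAbove X a i = true ↔
      ∀ j, i ≤ j → j < 31 → (red X).testBit j = true → (red a).testBit j = true := by
  unfold okAbove
  rw [List.all_eq_true]
  constructor
  · intro h j h1 h2 hx
    have hm : j ∈ List.range' i (31 - i) := by rw [List.mem_range'_1]; omega
    have := h j hm
    simpa [hx] using this
  · intro h j hj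
    rw [List.mem_range'_1] at hj
    by_cases hx : (red X).testBit j = true
    · simp [hx, h j (by omega) (by omega) hx]
    · simp [Bool.eq_false_iff.mpr hx]

-- the element predicate A counts at a zero bit i of X equals goodB
theorem mask_pred (X a : Int) (i : Nat) (hi : i ≤ 30) (hx : (red X).testBit i = false) :
    (PySem.Int.band a ((hm X (i+1) ||| 2^i : Nat) : Int) = ((hm X (i+1) ||| 2^i : Nat) : Int))
      ↔ goodB X a i = true := by
  have hMlt : hm X (i+1) ||| 2^i < 2^31 :=
    Nat.or_lt_two_pow (hm_lt X (i+1)) (Nat.pow_lt_pow_right (by norm_num) (by omega))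
  rw [band_mask a _ hMlt, Int.natCast_inj, submask_iff]
  have hMbit : ∀ j, (hm X (i+1) ||| 2^i).testBit j
      = ((decide (i+1 ≤ j) && (decide (j < 31) && (red X).testBit j)) || decide (i = j)) := by
    intro j
    rw [Nat.testBit_or, hm_testBit, Nat.testBit_two_pow]
  unfold goodB
  simp only [hx, Bool.not_false, Bool.true_and, Bool.and_eq_true, okAbove_iff]
  constructor
  · intro h
    refine ⟨fun j h1 h2 hxj => ?_, ?_⟩
    · exact h j (by rw [hMbit]; simp [h1, h2, hxj])
    · exact h i (by rw [hMbit]; simp)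
  · rintro ⟨hok, hab⟩ j hMj
    rw [hMbit] at hMj
    simp only [Bool.or_eq_true, Bool.and_eq_true, decide_eq_true_eq] at hMj
    rcases hMj with ⟨h1, h2, hxj⟩ | h1
    · exact hok j (by omega) h2 hxj
    · rw [← h1]; exact hab

-- ---- counting / extrema helpers ----

theorem foldl_count (p : Int → Prop) [DecidablePred p] (l : List Int) (c : Int) :
    l.foldl (fun c a => if p a then c + 1 else c) c = c + (l.countP (fun a => decide (p a)) : Int) := by
  induction l generalizing c with
  | nil => simp
  | cons x t IH =>
    simp only [List.foldl_cons, List.countP_cons, IH]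
    by_cases hp : p x <;> simp [hp] <;> push_cast <;> ring

theorem cnt_nonneg (X : Int) (A : List Int) (i : Nat) : 0 ≤ cnt X A i := by
  unfold cnt
  positivity

theorem cnt_xbit_zero (X : Int) (A : List Int) (i : Nat) (hx : (red X).testBit i = true) :
    cnt X A i = 0 := by
  unfold cnt
  have : (fun a => goodB X a i) = fun _ => false := by
    funext a
    unfold goodB
    rw [hx]
    rfl
  rw [this]
  simp

theorem ba_ge (X : Int) (A : List Int) (i : Nat) (hi : 31 ≤ i) : ba X A i = 0 := by
  unfold ba
  have : 31 - i = 0 := by omega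
  rw [this, List.range'_zero]
  rfl

theorem ba_top (X : Int) (A : List Int) : ba X A 31 = 0 := ba_ge X A 31 le_rfl

theorem ba_recur (X : Int) (A : List Int) (i : Nat) (hi : i < 31) :
    ba X A i = max (cnt X A i) (ba X A (i+1)) := by
  unfold ba
  have h : 31 - i = (31 - (i+1)) + 1 := by omega
  rw [h, List.range'_succ]
  simp

theorem ba_nonneg (X : Int) (A : List Int) (i : Nat) : 0 ≤ ba X A i := by
  induction hd : (31 - i) generalizing i with
  | zero => rw [ba_ge X A i (by omega)]
  | succ d IH =>
    rw [ba_recur X A i (by omega)]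
    exact le_trans (IH (i+1) (by omega)) (le_max_right _ _)

theorem foldr_max_max (l : List Int) (a b : Int) :
    l.foldr max (max a b) = max a (l.foldr max b) := by
  induction l with
  | nil => rfl
  | cons x t IH =>
    simp only [List.foldr_cons, IH]
    rw [max_left_comm]

theorem foldl_max_eq_foldr (l : List Int) (a : Int) :
    l.foldl max a = l.foldr max a := by
  induction l generalizing a with
  | nil => rfl
  | cons x t IH =>
    simp only [List.foldl_cons, List.foldr_cons, IH]
    rw [max_comm a x, foldr_max_max]

-- ---- A-side loop ----

theorem one_shl (i : Nat) : ((1:Int) <<< i) = ((2^i : Nat) : Int) := by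
  rw [Int.shiftLeft_eq]; push_cast; ring

theorem xor_restore (X : Int) (i : Nat) (hi : i ≤ 30) (hx : (red X).testBit i = false) :
    (hm X (i+1) ||| 2^i) ^^^ 2^i = hm X i := by
  rw [hm_recur X i (by omega), if_neg (by simp [hx])]
  apply Nat.eq_of_testBit_eq
  intro j
  rw [Nat.testBit_xor, Nat.testBit_or, Nat.testBit_two_pow]
  by_cases hj : j = i
  · subst hj
    rw [hm_testBit]
    simp [show ¬ (j+1 ≤ j) by omega]
  · simp [Ne.symm hj]

theorem stepA_eq (N : Int) (A : List Int) (X : Int) (i : Nat) (hi : i ≤ 30) :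
    stepA N A X (((hm X (i+1) : Nat) : Int), N - ba X A (i+1)) ((i : Nat) : Int)
      = (((hm X i : Nat) : Int), N - ba X A i) := by
  unfold stepA
  simp only [Int.toNat_natCast, one_shl]
  by_cases hx : (red X).testBit i = true
  · rw [if_pos ((band_test X i hi).mpr hx)]
    simp only [PySem.Int.bor_natCast, Prod.mk.injEq]
    constructor
    · rw [hm_recur X i (by omega), if_pos hx]
    · rw [ba_recur X A i (by omega), cnt_xbit_zero X A i hx,
        max_eq_right (ba_nonneg X A (i+1))]
  · have hx' : (red X).testBit i = false := Bool.eq_false_iff.mpr hx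
    rw [if_neg (fun hb => hx ((band_test X i hi).mp hb))]
    simp only [PySem.Int.bor_natCast, PySem.Int.bxor_natCast,
      foldl_count (p := fun a =>
        PySem.Int.band a (((hm X (i+1) ||| 2^i : Nat) : Int)) = (((hm X (i+1) ||| 2^i : Nat) : Int))),
      zero_add, Prod.mk.injEq]
    constructor
    · rw [xor_restore X i hi hx']
    · have hcong : A.countP (fun a => decide (PySem.Int.band a (((hm X (i+1) ||| 2^i : Nat) : Int))
          = (((hm X (i+1) ||| 2^i : Nat) : Int)))) = A.countP (fun a => goodB X a i) :=
        List.countP_congr (fun a _ =>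
          Iff.trans (decide_eq_true_iff) (mask_pred X a i hi hx'))
      rw [hcong]
      have hba := ba_recur X A i (by omega)
      unfold cnt at hba
      omega

theorem loopA (N : Int) (A : List Int) (X : Int) :
    ∀ i : Nat, i ≤ 30 →
      (PySem.List.pyRange ((i : Nat) : Int) (-1) (-1)).foldl (stepA N A X)
          (((hm X (i+1) : Nat) : Int), N - ba X A (i+1))
        = (((hm X 0 : Nat) : Int), N - ba X A 0) := by
  intro i
  induction i with
  | zero =>
    intro _
    rw [PySem.List.pyRange_neg_one_cons (by norm_num), show ((0:Nat):Int) - 1 = -1 by norm_num,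
      PySem.List.pyRange_neg_one_eq_nil le_rfl]
    simp only [List.foldl_cons, List.foldl_nil]
    exact stepA_eq N A X 0 (by norm_num)
  | succ i IH =>
    intro hi
    rw [PySem.List.pyRange_neg_one_cons (by push_cast; omega),
      show ((i+1:Nat):Int) - 1 = ((i:Nat):Int) by push_cast; ring]
    simp only [List.foldl_cons]
    rw [stepA_eq N A X (i+1) hi]
    exact IH (by omega)

theorem count_eq (N : Int) (A : List Int) (X : Int) : count N A X = N - ba X A 0 := by
  unfold count
  have h30 : ((30:Nat):Int) = (30:Int) := by norm_num
  have := loopA N A X 30 le_rfl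
  rw [h30, hm_top, ba_top] at this
  norm_num at this
  rw [this]

-- ---- B-side loop ----

theorem updFrom_top (X a : Int) (cs : List Int) (h : cs.length = 31) : updFrom X a 31 cs = cs := by
  apply List.ext_getElem
  · simp [updFrom]
  · intro j hj1 hj2
    unfold updFrom
    rw [List.getElem_mapIdx, if_neg]
    rintro ⟨h31, -⟩
    omega

theorem updFrom_succ_eq (X a : Int) (i : Nat) (cs : List Int)
    (hgood : goodB X a i = false) : updFrom X a i cs = updFrom X a (i+1) cs := by
  apply List.ext_getElem
  · simp [updFrom]
  · intro j hj1 hj2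
    unfold updFrom
    rw [List.getElem_mapIdx, List.getElem_mapIdx]
    by_cases hj : j = i
    · subst hj
      simp [hgood]
    · have h' : i ≤ j ↔ i+1 ≤ j := by omega
      simp only [h']

theorem innerB_eq (X a : Int) (i : Nat) (hi : i ≤ 30) (cs : List Int) (h : cs.length = 31) :
    innerB X a (okAbove X a (i+1), updFrom X a (i+1) cs) ((i : Nat) : Int)
      = (okAbove X a i, updFrom X a i cs) := by
  unfold innerB
  simp only [Int.toNat_natCast, one_shl]
  by_cases hx : (red X).testBit i = true
  · rw [if_pos ((band_test X i hi).mpr hx)]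
    have hgood : goodB X a i = false := by unfold goodB; rw [hx]; rfl
    rw [okAbove_recur X a i (by omega), hx]
    by_cases hab : (red a).testBit i = true
    · rw [if_neg (by simpa using (band_test a i hi).mpr hab)]
      simp [hab, updFrom_succ_eq X a i cs hgood]
    · have hab' : (red a).testBit i = false := Bool.eq_false_iff.mpr hab
      rw [if_pos (by
        by_contra hne
        exact hab ((band_test a i hi).mp hne))]
      simp [hab', updFrom_succ_eq X a i cs hgood]
  · have hx' : (red X).testBit i = false := Bool.eq_false_iff.mpr hx
    rw [if_neg (fun hb => hx ((band_test X i hi).mp hb))]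
    have hok : okAbove X a i = okAbove X a (i+1) := by
      rw [okAbove_recur X a i (by omega), hx']
      simp
    by_cases hcond : okAbove X a (i+1) = true ∧ (red a).testBit i = true
    · have hgood : goodB X a i = true := by
        unfold goodB
        rw [hx', hcond.1, hcond.2]
        rfl
      rw [if_pos ⟨hcond.1, (band_test a i hi).mpr hcond.2⟩]
      simp only [PySem.List.pySetD_natCast, PySem.List.pyGetD_natCast, Prod.mk.injEq]
      refine ⟨hok.symm, ?_⟩
      have hlen1 : (updFrom X a (i+1) cs).length = 31 := by simp [updFrom, h]
      apply List.ext_getElem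
      · simp [updFrom, h]
      · intro j hj1 hj2
        have hj31 : j < 31 := by simp [updFrom, h] at hj2; omega
        rw [List.getElem_set]
        unfold updFrom
        rw [List.getElem_mapIdx, List.getElem_mapIdx]
        by_cases hj : i = j
        · subst hj
          rw [if_pos rfl, if_pos ⟨le_rfl, hgood⟩,
            List.getD_eq_getElem _ _ (by simp [h]; omega), List.getElem_mapIdx,
            if_neg (by rintro ⟨hc, -⟩; omega)]
        · rw [if_neg hj]
          have h' : i ≤ j ↔ i+1 ≤ j := by omega
          simp only [h']
    · have hgood : goodB X a i = false := by
        unfold goodB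
        rw [hx']
        simp only [Bool.not_false, Bool.true_and]
        rcases Decidable.not_and_iff_or_not.mp hcond with hc | hc
        · simp [Bool.eq_false_iff.mpr hc]
        · simp [Bool.eq_false_iff.mpr hc]
      rw [if_neg (fun hc => hcond ⟨hc.1, (band_test a i hi).mp hc.2⟩)]
      rw [updFrom_succ_eq X a i cs hgood, hok]

theorem loopB (X a : Int) (cs : List Int) (h : cs.length = 31) :
    ∀ i : Nat, i ≤ 30 →
      (PySem.List.pyRange ((i : Nat) : Int) (-1) (-1)).foldl (innerB X a)
          (okAbove X a (i+1), updFrom X a (i+1) cs)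
        = (okAbove X a 0, updFrom X a 0 cs) := by
  intro i
  induction i with
  | zero =>
    intro _
    rw [PySem.List.pyRange_neg_one_cons (by norm_num), show ((0:Nat):Int) - 1 = -1 by norm_num,
      PySem.List.pyRange_neg_one_eq_nil le_rfl]
    simp only [List.foldl_cons, List.foldl_nil]
    exact innerB_eq X a 0 (by norm_num) cs h
  | succ i IH =>
    intro hi
    rw [PySem.List.pyRange_neg_one_cons (by push_cast; omega),
      show ((i+1:Nat):Int) - 1 = ((i:Nat):Int) by push_cast; ring]
    simp only [List.foldl_cons]
    rw [innerB_eq X a (i+1) hi cs h]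
    exact IH (by omega)

theorem outerB_eq (X a : Int) (cs : List Int) (h : cs.length = 31) :
    outerB X cs a = updFrom X a 0 cs := by
  unfold outerB
  have h30 : (30:Int) = ((30:Nat):Int) := by norm_num
  rw [h30, show (true, cs) = (okAbove X a 31, updFrom X a 31 cs) by
      rw [okAbove_top, updFrom_top X a cs h],
    loopB X a cs h 30 le_rfl]

theorem foldl_outerB (X : Int) :
    ∀ (l : List Int) (cs : List Int), cs.length = 31 →
      l.foldl (outerB X) cs
        = (List.range 31).map (fun j => cs.getD j 0 + (l.countP (fun a => goodB X a j) : Int)) := by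
  intro l
  induction l with
  | nil =>
    intro cs h
    simp only [List.foldl_nil, List.countP_nil]
    apply List.ext_getElem
    · simp [h]
    · intro j hj1 hj2
      rw [List.getElem_map, List.getElem_range]
      rw [List.getD_eq_getElem _ _ (by omega)]
      push_cast
      ring
  | cons a t IH =>
    intro cs h
    rw [List.foldl_cons, outerB_eq X a cs h,
      IH (updFrom X a 0 cs) (by simp [updFrom, h])]
    apply List.map_congr_left
    intro j hj
    rw [List.mem_range] at hj
    have hget : (updFrom X a 0 cs).getD j 0
        = cs.getD j 0 + (if goodB X a j = true then 1 else 0) := by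
      rw [List.getD_eq_getElem _ _ (by simp [updFrom, h]; omega)]
      unfold updFrom
      rw [List.getElem_mapIdx, List.getD_eq_getElem _ _ (by omega)]
      by_cases hg : goodB X a j = true
      · rw [if_pos ⟨Nat.zero_le j, hg⟩, if_pos hg]
      · rw [if_neg (fun hc => hg hc.2), if_neg hg]
        ring
    rw [hget, List.countP_cons]
    by_cases hg : goodB X a j = true
    · simp [hg]
      push_cast
      ring
    · simp [hg]
  

theorem counts_eq (X : Int) (A : List Int) :
    A.foldl (outerB X) (List.replicate 31 (0:Int)) = (List.range 31).map (cnt X A) := by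
  rw [foldl_outerB X A (List.replicate 31 (0:Int)) (by simp)]
  apply List.map_congr_left
  intro j hj
  rw [List.mem_range] at hj
  rw [List.getD_replicate _ hj]
  unfold cnt
  ring

theorem max_counts (X : Int) (A : List Int) :
    ((PySem.List.max? ((List.range 31).map (cnt X A)) (fun y => y)).getD 0) = ba X A 0 := by
  have hr : List.range 31 = 0 :: List.range' 1 30 := by
    rw [List.range_eq_range']
    rfl
  rw [hr, List.map_cons, PySem.List.max?_id_cons, Option.getD_some,
    foldl_max_eq_foldr]
  unfold ba
  rw [show List.range' 0 (31 - 0) = 0 :: List.range' 1 30 from rfl, List.map_cons,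
    List.foldr_cons]
  have hbase : cnt X A 0 = max (cnt X A 0) 0 := (max_eq_left (cnt_nonneg X A 0)).symm
  conv_lhs => rw [hbase]
  rw [foldr_max_max]

theorem count_alt_eq (N : Int) (A : List Int) (X : Int) : count_alt N A X = N - ba X A 0 := by
  unfold count_alt
  simp only [counts_eq X A, max_counts X A]

-- ===== VERDICT (by name: the statement is the Claim_ definition above) =====
theorem count_spec : Claim_equal_count := by
  intro N A X _
  unfold Spec_count
  rw [count_eq, count_alt_eq]
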